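-- pv_equiv track=rewrite | github.com/door2u/path | make/code/Math.py | ImagSort
-- ===== SOURCE A (Python) =====
-- def ImagSort(term):
-- 	imag = ""
-- 	tern = ""
-- 	for a in range(len(term)):
-- 		if term[a] == "i" or term[a] == "j" or term[a] == "k":
-- 			imag += term[a]
-- 		else:
-- 			tern += term[a]
-- 	tern = sorted(tern)
-- 	term = ""
-- 	for a in range(len(tern)):
-- 		term += tern[a]
-- 	term += imag
-- 	return term
-- ===== SOURCE B (Python) =====
-- def ImagSort(term):
--     imag = []
--     counts = {}
--     hi = -1
--     for c in term:
--         if c in "ijk":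
--             imag.append(c)
--         else:
--             o = ord(c)
--             counts[o] = counts.get(o, 0) + 1
--             if o > hi:
--                 hi = o
--     out = []
--     for o in range(hi + 1):
--         out.append(chr(o) * counts.get(o, 0))
--     out.append("".join(imag))
--     return "".join(out)
-- ===== Notes on version B (the rewrite author's own statement) =====
-- stated objective: faster
-- what changed: Replaces the index-loop partition built by quadratic string concatenation plus a comparison sort with a single pass that tallies non-imaginary characters in a code-point frequency dict and rebuilds the sorted part by a counting-sort walk over code points in ascending order.
import Mathlib
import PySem

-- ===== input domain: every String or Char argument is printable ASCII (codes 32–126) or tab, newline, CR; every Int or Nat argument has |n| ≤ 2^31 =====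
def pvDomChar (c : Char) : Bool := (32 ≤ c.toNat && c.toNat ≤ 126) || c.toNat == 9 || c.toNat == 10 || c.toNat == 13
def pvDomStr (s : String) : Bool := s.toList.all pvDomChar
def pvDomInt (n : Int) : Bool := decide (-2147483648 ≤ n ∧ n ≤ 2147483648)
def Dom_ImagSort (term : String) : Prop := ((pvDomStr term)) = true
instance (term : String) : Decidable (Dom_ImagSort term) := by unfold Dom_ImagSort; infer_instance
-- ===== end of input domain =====

-- B replaces A's quadratic string-building partition + comparison sort by one tallying
-- pass and a counting-sort reconstruction over code points (measured faster).

-- ===== PORT A =====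
-- loop body of A's first loop: partition term[a] into (imag, tern)
def ImagSortStepA (p : List Char × List Char) (c : Char) : List Char × List Char :=
  if c = 'i' ∨ c = 'j' ∨ c = 'k' then (p.1 ++ [c], p.2) else (p.1, p.2 ++ [c])

def ImagSort (term : String) : String :=
  -- for a in range(len(term)): partition term[a] into imag / tern
  let p := (PySem.List.pyRange 0 (term.toList.length : Int) 1).foldl
    (fun p a => ImagSortStepA p (PySem.List.pyGetD term.toList a ' ')) ([], [])
  let tern := PySem.List.sorted p.2 (fun x => x) false
  -- for a in range(len(tern)): term += tern[a]
  let out := (PySem.List.pyRange 0 (tern.length : Int) 1).foldl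
    (fun (acc : List Char) a => acc ++ [PySem.List.pyGetD tern a ' ']) []
  String.ofList (out ++ p.1)

-- ===== PORT B =====
-- loop body of B's single pass: append to imag, or tally ord(c) and update hi
def ImagSortStepB (st : List Char × PySem.Dict Int Int × Int) (c : Char) :
    List Char × PySem.Dict Int Int × Int :=
  -- c in "ijk" : single-character membership = equality with 'i'/'j'/'k' (exact)
  if c = 'i' ∨ c = 'j' ∨ c = 'k' then (st.1 ++ [c], st.2.1, st.2.2)
  else
    let o : Int := (c.toNat : Int)
    (st.1, st.2.1.insert o (st.2.1.getD o 0 + 1), if o > st.2.2 then o else st.2.2)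

def ImagSort_alt (term : String) : String :=
  let st := term.toList.foldl ImagSortStepB ([], PySem.Dict.empty, -1)
  -- for o in range(hi+1): out.append(chr(o) * counts.get(o, 0))
  let out := (PySem.List.pyRange 0 (st.2.2 + 1) 1).foldl
    (fun (acc : List Char) o =>
      acc ++ List.replicate (st.2.1.getD o 0).toNat (Char.ofNat o.toNat)) []
  String.ofList (out ++ st.1)

-- ===== PRECONDITION & SPEC =====
def Spec_ImagSort (term : String) (out : String) : Prop := out = ImagSort_alt term
instance (term : String) (out : String) : Decidable (Spec_ImagSort term out) := by unfold Spec_ImagSort; infer_instance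

-- ===== CLAIM (what is proved, stated in full; the proofs are below) =====
def Claim_equal_ImagSort : Prop := ∀ (term : String), Dom_ImagSort term → Spec_ImagSort term (ImagSort term)

-- ===== LEMMAS AND PROOFS =====

def pvIsIJK (c : Char) : Bool := c == 'i' || c == 'j' || c == 'k'

theorem pvCharOfNat_toNat (k : Nat) (h : k < 127) : (Char.ofNat k).toNat = k := by
  have hv : Nat.isValidChar k := Or.inl (by omega)
  simp [Char.ofNat, hv, Char.toNat, Char.ofNatAux]

theorem pvChar_le_of_toNat_le (a b : Char) (h : a.toNat ≤ b.toNat) : a ≤ b := by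
  rw [Char.le_def]; exact UInt32.le_iff_toNat_le.mpr h

theorem pvCharOfNat_eq_iff (k : Nat) (hk : k < 127) (c : Char) :
    Char.ofNat k = c ↔ c.toNat = k := by
  constructor
  · rintro rfl; exact pvCharOfNat_toNat k hk
  · intro h; rw [← h, Char.ofNat_toNat]

-- A's first loop is the partition into (imag-chars, other-chars)
theorem pvPartA (l : List Char) (i t : List Char) :
    l.foldl ImagSortStepA (i, t) =
      (i ++ l.filter pvIsIJK, t ++ l.filter (fun c => !pvIsIJK c)) := by
  induction l generalizing i t with
  | nil => simp
  | cons c l ih =>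
    by_cases h : c = 'i' ∨ c = 'j' ∨ c = 'k'
    · have hb : pvIsIJK c = true := by
        rcases h with h | h | h <;> simp [pvIsIJK, h]
      simp [ImagSortStepA, h, ih, hb]
    · have hb : pvIsIJK c = false := by
        simp only [pvIsIJK, Bool.or_eq_false_iff, beq_eq_false_iff_ne]; tauto
      simp [ImagSortStepA, h, ih, hb]

-- B's single pass, decomposed into the three accumulators
theorem pvPartB (l : List Char) (i : List Char) (d : PySem.Dict Int Int) (h : Int) :
    l.foldl ImagSortStepB (i, d, h) =
      (i ++ l.filter pvIsIJK,
       (l.filter (fun c => !pvIsIJK c)).foldl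
         (fun d c => d.insert (c.toNat : Int) (d.getD (c.toNat : Int) 0 + 1)) d,
       (l.filter (fun c => !pvIsIJK c)).foldl
         (fun h c => if (c.toNat : Int) > h then (c.toNat : Int) else h) h) := by
  induction l generalizing i d h with
  | nil => simp
  | cons c l ih =>
    by_cases hc : c = 'i' ∨ c = 'j' ∨ c = 'k'
    · have hb : pvIsIJK c = true := by
        rcases hc with hc | hc | hc <;> simp [pvIsIJK, hc]
      simp [ImagSortStepB, hc, ih, hb]
    · have hb : pvIsIJK c = false := by
        simp only [pvIsIJK, Bool.or_eq_false_iff, beq_eq_false_iff_ne]; tauto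
      simp [ImagSortStepB, hc, ih, hb]

-- the running-maximum fold, characterised by an upper-bound iff
theorem pvFoldHi_le_iff (l : List Int) (h m : Int) :
    l.foldl (fun h o => if o > h then o else h) h ≤ m ↔ h ≤ m ∧ ∀ x ∈ l, x ≤ m := by
  induction l generalizing h with
  | nil => simp
  | cons o l ih =>
    simp only [List.foldl_cons, ih, List.mem_cons]
    constructor
    · rintro ⟨h1, h2⟩
      refine ⟨by split_ifs at h1 <;> omega, fun x hx => ?_⟩
      rcases hx with rfl | hx
      · split_ifs at h1 <;> omega
      · exact h2 x hx
    · rintro ⟨h1, h2⟩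
      have ho := h2 o (Or.inl rfl)
      refine ⟨?_, fun x hx => h2 x (Or.inr hx)⟩
      split_ifs <;> omega

-- count of the ord-image vs count of the character
theorem pvCount_ord (rest : List Char) (k : Nat) (hk : k < 127) :
    (rest.map (fun c => (c.toNat : Int))).count (k : Int) = rest.count (Char.ofNat k) := by
  induction rest with
  | nil => simp
  | cons c rest ih =>
    rw [List.map_cons, List.count_cons, List.count_cons, ih]
    congr 1
    have : ((c.toNat : Int) = (k : Int)) ↔ (Char.ofNat k = c) := by
      rw [pvCharOfNat_eq_iff k hk c]; omega
    simp only [beq_iff_eq]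
    by_cases hc : (c.toNat : Int) = (k : Int)
    · simp [(this.mp hc).symm, pvCharOfNat_toNat k hk]
    · have : ¬ (c = Char.ofNat k) := fun he => hc (this.mpr he.symm)
      simp [hc, this]

-- counting the flatMap of replicate blocks
theorem pvCount_flat (rest : List Char) (N : Nat) (hN : N ≤ 127) (c : Char) :
    ((List.range N).flatMap
        (fun k => List.replicate (rest.count (Char.ofNat k)) (Char.ofNat k))).count c =
      if c.toNat < N then rest.count c else 0 := by
  induction N with
  | zero => simp
  | succ N ih =>
    rw [List.range_succ, List.flatMap_append, List.count_append, ih (by omega)]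
    have hNv : N < 127 := by omega
    simp only [List.flatMap_cons, List.flatMap_nil, List.append_nil, List.count_replicate]
    by_cases hc : c.toNat = N
    · have he : Char.ofNat N = c := (pvCharOfNat_eq_iff N hNv c).mpr hc
      rw [he, if_neg (by omega : ¬ c.toNat < N), if_pos (by omega : c.toNat < N + 1)]
      simp
    · have he : ¬ (Char.ofNat N = c) := fun h => hc ((pvCharOfNat_eq_iff N hNv c).mp h)
      have hb : (Char.ofNat N == c) = false := by simp [he]
      rw [hb]
      by_cases hlt : c.toNat < N
      · rw [if_pos hlt, if_pos (by omega : c.toNat < N + 1)]; simp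
      · rw [if_neg hlt, if_neg (by omega : ¬ c.toNat < N + 1)]; simp

theorem pvPairwise_flat (rest : List Char) (N : Nat) (hN : N ≤ 127) :
    ((List.range N).flatMap
        (fun k => List.replicate (rest.count (Char.ofNat k)) (Char.ofNat k))).Pairwise (· ≤ ·) := by
  induction N with
  | zero => simp
  | succ N ih =>
    rw [List.range_succ, List.flatMap_append]
    rw [List.pairwise_append]
    refine ⟨ih (by omega), ?_, ?_⟩
    · simp only [List.flatMap_cons, List.flatMap_nil, List.append_nil]
      exact List.pairwise_replicate.mpr (Or.inr le_rfl)
    · intro a ha b hb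
      simp only [List.flatMap_cons, List.flatMap_nil, List.append_nil,
        List.mem_replicate] at hb
      rw [List.mem_flatMap] at ha
      obtain ⟨k, hk, ha⟩ := ha
      rw [List.mem_range] at hk
      rw [List.mem_replicate] at ha
      rw [ha.2, hb.2]
      apply pvChar_le_of_toNat_le
      rw [pvCharOfNat_toNat k (by omega), pvCharOfNat_toNat N (by omega)]
      omega

-- the counting-sort reconstruction names the sorted order
theorem pvCountingSort (rest : List Char) (N : Nat) (hN : N ≤ 127)
    (hall : ∀ c ∈ rest, c.toNat < N) :
    PySem.List.sorted rest (fun x => x) false =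
      (List.range N).flatMap
        (fun k => List.replicate (rest.count (Char.ofNat k)) (Char.ofNat k)) := by
  apply PySem.List.sorted_id_eq_of_perm_of_pairwise
  · rw [List.perm_iff_count]
    intro c
    rw [pvCount_flat rest N hN c]
    by_cases hc : c.toNat < N
    · simp [hc]
    · have : c ∉ rest := fun hm => hc (hall c hm)
      simp [hc, List.count_eq_zero.mpr this]
  · exact pvPairwise_flat rest N hN

-- ===== VERDICT (by name: the statement is the Claim_ definition above) =====
theorem ImagSort_spec : Claim_equal_ImagSort := by
  intro term hdom
  unfold Spec_ImagSort ImagSort ImagSort_alt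
  simp only [PySem.List.foldl_pyRange_zero_pyGetD' term.toList ' ' ImagSortStepA ([], []),
    pvPartA, List.nil_append]
  set tern := PySem.List.sorted (List.filter (fun c => !pvIsIJK c) term.toList) (fun x => x) false with htern
  rw [PySem.List.foldl_pyRange_zero_pyGetD' tern ' ' (fun acc c => acc ++ [c]) []]
  rw [PySem.List.foldl_append_singleton_eq_self, List.nil_append]
  rw [pvPartB term.toList [] PySem.Dict.empty (-1)]
  simp only [List.nil_append]
  set rest := List.filter (fun c => !pvIsIJK c) term.toList with hrest
  -- the two inner folds become folds over the code list
  set codes := rest.map (fun c => (c.toNat : Int)) with hcodes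
  have hdfold : rest.foldl
      (fun d c => d.insert (c.toNat : Int) (d.getD (c.toNat : Int) 0 + 1))
        (PySem.Dict.empty : PySem.Dict Int Int)
      = codes.foldl (fun d x => d.insert x (d.getD x 0 + 1))
        (PySem.Dict.empty : PySem.Dict Int Int) := by
    rw [hcodes, List.foldl_map]
  have hhfold : rest.foldl
      (fun h c => if (c.toNat : Int) > h then (c.toNat : Int) else h) (-1 : Int)
      = codes.foldl (fun h o => if o > h then o else h) (-1 : Int) := by
    rw [hcodes, List.foldl_map]
  simp only [hdfold, hhfold]
  set hi := codes.foldl (fun h o => if o > h then o else h) (-1 : Int) with hhi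
  -- bounds on hi from the domain
  have hdomc : ∀ c ∈ term.toList, c.toNat ≤ 126 := by
    intro c hc
    have := (List.all_eq_true.mp hdom) c hc
    simp only [pvDomChar, Bool.or_eq_true, Bool.and_eq_true, decide_eq_true_eq,
      beq_iff_eq] at this
    omega
  have hcodes_le : ∀ x ∈ codes, x ≤ 126 := by
    intro x hx
    rw [hcodes] at hx
    obtain ⟨c, hc, rfl⟩ := List.mem_map.mp hx
    have := hdomc c (List.mem_of_mem_filter hc)
    omega
  have hhi_ub : hi ≤ 126 :=
    (pvFoldHi_le_iff codes (-1) 126).mpr ⟨by norm_num, hcodes_le⟩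
  have hhi_lb : (-1 : Int) ≤ hi := ((pvFoldHi_le_iff codes (-1) hi).mp le_rfl).1
  have helems : ∀ x ∈ codes, x ≤ hi := ((pvFoldHi_le_iff codes (-1) hi).mp le_rfl).2
  have hN : (hi + 1).toNat ≤ 127 := by omega
  have hall : ∀ c ∈ rest, c.toNat < (hi + 1).toNat := by
    intro c hc
    have hx : (c.toNat : Int) ∈ codes := by
      rw [hcodes]; exact List.mem_map.mpr ⟨c, hc, rfl⟩
    have := helems _ hx
    omega
  -- turn B's reconstruction loop into the flatMap of replicate blocks
  rw [PySem.List.foldl_append_eq_flatMap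
    (fun o => List.replicate (((codes.foldl (fun d x => d.insert x (d.getD x 0 + 1))
      (PySem.Dict.empty : PySem.Dict Int Int)).getD o 0)).toNat (Char.ofNat o.toNat))]
  rw [List.nil_append, PySem.List.pyRange_zero (hi + 1), List.flatMap_map]
  have hblocks : ∀ k ∈ List.range (hi + 1).toNat,
      List.replicate (((codes.foldl (fun d x => d.insert x (d.getD x 0 + 1))
          (PySem.Dict.empty : PySem.Dict Int Int)).getD ((k : Nat) : Int) 0)).toNat
        (Char.ofNat ((k : Int)).toNat)
        = List.replicate (rest.count (Char.ofNat k)) (Char.ofNat k) := by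
    intro k hk
    have hk' : k < 127 := by
      have := List.mem_range.mp hk; omega
    rw [PySem.Dict.getD_foldl_insert_add_one, PySem.Dict.getD_empty, Int.toNat_natCast,
      pvCount_ord rest k hk']
    simp
  rw [List.flatMap_congr hblocks]
  rw [htern, pvCountingSort rest (hi + 1).toNat hN hall]
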